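-- pv_equiv track=rewrite | github.com/Demon-Sheriff/tts-inference | tensorrt_tts/helpers/compare_snac.py | redistribute_codes
-- ===== SOURCE A (Python) =====
-- def redistribute_codes(codes: list[int]) -> tuple[list[int], list[int], list[int]]:
--     """
--     Redistribute codes into SNAC layers.
--     EXACT copy from Orpheus notebook.
--     """
--     layer_1 = []
--     layer_2 = []
--     layer_3 = []
--
--     for i in range((len(codes) + 1) // 7):
--         layer_1.append(codes[7 * i])
--         layer_2.append(codes[7 * i + 1] - 4096)
--         layer_3.append(codes[7 * i + 2] - (2 * 4096))
--         layer_3.append(codes[7 * i + 3] - (3 * 4096))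
--         layer_2.append(codes[7 * i + 4] - (4 * 4096))
--         layer_3.append(codes[7 * i + 5] - (5 * 4096))
--         layer_3.append(codes[7 * i + 6] - (6 * 4096))
--
--     return layer_1, layer_2, layer_3
-- ===== SOURCE B (Python) =====
-- def redistribute_codes(codes: list[int]) -> tuple[list[int], list[int], list[int]]:
--     # B: strided column extraction + zip-interleave, instead of a per-chunk index loop.
--     # Seven stride-7 slices give the per-position columns; layer 2 is the columns at
--     # positions 1 and 4 interleaved, layer 3 the columns at 2,3,5,6 interleaved.
--     n = 7 * ((len(codes) + 1) // 7)
--     c0, c1, c2, c3, c4, c5, c6 = (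
--         [x - 4096 * p for x in codes[p:n:7]] for p in range(7)
--     )
--     layer_2 = [v for pair in zip(c1, c4) for v in pair]
--     layer_3 = [v for quad in zip(c2, c3, c5, c6) for v in quad]
--     return c0, layer_2, layer_3
-- ===== Notes on version B (the rewrite author's own statement) =====
-- stated objective: alternative
-- what changed: Replaces A's per-chunk index loop with seven interleaved appends by a column-wise decomposition: seven stride-7 slices codes[p:n:7] (offset subtracted per column), with layer 2 = zip-interleave of columns 1 and 4 and layer 3 = zip-interleave of columns 2,3,5,6.
import Mathlib
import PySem

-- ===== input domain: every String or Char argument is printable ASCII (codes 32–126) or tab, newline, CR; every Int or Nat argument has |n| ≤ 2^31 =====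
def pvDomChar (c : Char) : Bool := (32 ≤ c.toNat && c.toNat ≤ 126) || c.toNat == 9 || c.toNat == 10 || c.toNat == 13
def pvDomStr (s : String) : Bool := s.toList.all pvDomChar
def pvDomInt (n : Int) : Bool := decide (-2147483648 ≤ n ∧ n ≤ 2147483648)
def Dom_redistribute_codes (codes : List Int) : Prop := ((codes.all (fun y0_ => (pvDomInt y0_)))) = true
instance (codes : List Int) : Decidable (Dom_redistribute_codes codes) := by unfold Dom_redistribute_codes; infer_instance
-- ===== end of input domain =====

-- B replaces A's per-chunk index loop (seven appends per chunk) by stride-7 column slices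
-- that are zip-interleaved into the three layers (alternative decomposition, same cost).

-- ===== PORT A =====
-- literal transliteration of A's loop: one fold over range((len+1)//7), appending to the three layers in A's order
def redistribute_codes (codes : List Int) : List Int × List Int × List Int :=
  (PySem.List.pyRange 0 (PySem.Int.floordiv ((codes.length : Int) + 1) 7) 1).foldl
    (fun acc i =>
      let layer_1 := acc.1 ++ [PySem.List.pyGetD codes (7 * i) 0]
      let layer_2 := acc.2.1 ++ [PySem.List.pyGetD codes (7 * i + 1) 0 - 4096]
      let layer_3 := acc.2.2 ++ [PySem.List.pyGetD codes (7 * i + 2) 0 - 2 * 4096]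
      let layer_3 := layer_3 ++ [PySem.List.pyGetD codes (7 * i + 3) 0 - 3 * 4096]
      let layer_2 := layer_2 ++ [PySem.List.pyGetD codes (7 * i + 4) 0 - 4 * 4096]
      let layer_3 := layer_3 ++ [PySem.List.pyGetD codes (7 * i + 5) 0 - 5 * 4096]
      let layer_3 := layer_3 ++ [PySem.List.pyGetD codes (7 * i + 6) 0 - 6 * 4096]
      (layer_1, layer_2, layer_3))
    ([], [], [])

-- ===== PORT B =====
-- literal transliteration of Source B: seven stride-7 column slices (codes[p:n:7], offset subtracted),
-- then layer 2 = columns 1,4 zip-interleaved and layer 3 = columns 2,3,5,6 zip-interleaved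
-- (Python's 4-ary zip is ported as nested binary zips, exact for equal-shape tuples).
def redistribute_codes_alt (codes : List Int) : List Int × List Int × List Int :=
  let n : Int := 7 * PySem.Int.floordiv ((codes.length : Int) + 1) 7
  let col : Int → List Int := fun p =>
    ((PySem.List.slice? codes (some p) (some n) 7).getD []).map (fun x => x - 4096 * p)
  let c0 := col 0
  let c1 := col 1
  let c2 := col 2
  let c3 := col 3
  let c4 := col 4
  let c5 := col 5
  let c6 := col 6
  let layer_2 := (c1.zip c4).flatMap (fun q => [q.1, q.2])
  let layer_3 := ((c2.zip c3).zip (c5.zip c6)).flatMap (fun q => [q.1.1, q.1.2, q.2.1, q.2.2])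
  (c0, layer_2, layer_3)

-- ===== PRECONDITION & SPEC =====
-- Python A raises IndexError exactly when len(codes) % 7 == 6 (the chunk count (len+1)//7 then
-- reaches one index past the end); those inputs are excluded.
def Pre_redistribute_codes (codes : List Int) : Prop := (codes.length : Int) % 7 ≠ 6
instance (codes : List Int) : Decidable (Pre_redistribute_codes codes) := by unfold Pre_redistribute_codes; infer_instance
def pvWitness_redistribute_codes : List Int := [1, 4100, 8200, 12300, 16400, 20500, 24600]

def Spec_redistribute_codes (codes : List Int) (out : List Int × List Int × List Int) : Prop := out = redistribute_codes_alt codes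
instance (codes : List Int) (out : List Int × List Int × List Int) : Decidable (Spec_redistribute_codes codes out) := by unfold Spec_redistribute_codes; infer_instance

-- ===== CLAIM (what is proved, stated in full; the proofs are below) =====
def Claim_equal_redistribute_codes : Prop := ∀ (codes : List Int), Dom_redistribute_codes codes → Pre_redistribute_codes codes → Spec_redistribute_codes codes (redistribute_codes codes)

-- ===== LEMMAS AND PROOFS =====

-- loop invariant for A: the fold over any index list equals the accumulators extended by per-layer flatMaps
theorem redistribute_fold_eq (codes : List Int) (L : List Int) (l1 l2 l3 : List Int) :
    L.foldl
      (fun acc i =>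
        let layer_1 := acc.1 ++ [PySem.List.pyGetD codes (7 * i) 0]
        let layer_2 := acc.2.1 ++ [PySem.List.pyGetD codes (7 * i + 1) 0 - 4096]
        let layer_3 := acc.2.2 ++ [PySem.List.pyGetD codes (7 * i + 2) 0 - 2 * 4096]
        let layer_3 := layer_3 ++ [PySem.List.pyGetD codes (7 * i + 3) 0 - 3 * 4096]
        let layer_2 := layer_2 ++ [PySem.List.pyGetD codes (7 * i + 4) 0 - 4 * 4096]
        let layer_3 := layer_3 ++ [PySem.List.pyGetD codes (7 * i + 5) 0 - 5 * 4096]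
        let layer_3 := layer_3 ++ [PySem.List.pyGetD codes (7 * i + 6) 0 - 6 * 4096]
        (layer_1, layer_2, layer_3))
      (l1, l2, l3)
    = (l1 ++ L.map (fun i => PySem.List.pyGetD codes (7 * i) 0),
       l2 ++ L.flatMap (fun i => [PySem.List.pyGetD codes (7 * i + 1) 0 - 4096,
                                  PySem.List.pyGetD codes (7 * i + 4) 0 - 4 * 4096]),
       l3 ++ L.flatMap (fun i => [PySem.List.pyGetD codes (7 * i + 2) 0 - 2 * 4096,
                                  PySem.List.pyGetD codes (7 * i + 3) 0 - 3 * 4096,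
                                  PySem.List.pyGetD codes (7 * i + 5) 0 - 5 * 4096,
                                  PySem.List.pyGetD codes (7 * i + 6) 0 - 6 * 4096])) := by
  induction L generalizing l1 l2 l3 with
  | nil => simp
  | cons a t ih =>
      simp only [List.foldl_cons, List.flatMap_cons, List.map]
      rw [ih]
      simp [List.append_assoc]

-- B's column slice codes[p:7k:7] evaluated: the k per-chunk elements at position p
theorem col_eval (codes : List Int) (k : Nat) (p : Int) (hp0 : 0 ≤ p) (hp7 : p < 7)
    (hlen : 7 * k ≤ codes.length) :
    (PySem.List.slice? codes (some p) (some (7 * (k:Int))) 7).getD []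
      = (List.range k).map (fun j => codes.getD (p.toNat + 7 * j) 0) := by
  unfold PySem.List.slice? PySem.List.sliceIndices
  simp only [show ¬((7:Int) = 0) by norm_num, show ¬((7:Int) < 0) by norm_num,
    show (0:Int) < 7 by norm_num, if_neg, if_pos,
    if_neg (show ¬ p < 0 by omega), if_neg (show ¬ (7:Int) * (k:Int) < 0 by omega),
    not_false_eq_true, Option.getD_some]
  rcases Nat.eq_zero_or_pos k with hk | hk
  · subst hk
    rw [if_neg (by simp; omega)]
    simp
  · have hlen7 : 7 ≤ codes.length := by omega
    rw [min_eq_left (by omega), min_eq_left (by omega), if_pos (by omega)]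
    have hcount : ((7 * (k:Int) - p + 7 - 1) / 7).toNat = k := by omega
    rw [hcount]
    apply List.filterMap_eq_map_iff_forall_eq_some.mpr
    intro j hj
    rw [List.mem_range] at hj
    have hlt : (p + 7 * (j:Int)).toNat < codes.length := by omega
    rw [List.getElem?_eq_getElem hlt]
    congr 1
    rw [List.getD_eq_getElem _ _ (by omega : p.toNat + 7*j < codes.length)]
    congr 1
    omega

-- ===== VERDICT (by name: the statement is the Claim_ definition above) =====
theorem redistribute_codes_spec : Claim_equal_redistribute_codes := by
  intro codes _ hpre
  unfold Pre_redistribute_codes at hpre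
  unfold Spec_redistribute_codes redistribute_codes redistribute_codes_alt
  have hK : PySem.Int.floordiv ((codes.length : Int) + 1) 7 = ((codes.length / 7 : Nat) : Int) := by
    rw [PySem.Int.floordiv_eq_ediv_of_pos (by norm_num)]
    omega
  set k : Nat := codes.length / 7 with hk
  have hlen : 7 * k ≤ codes.length := by omega
  rw [hK, redistribute_fold_eq, PySem.List.pyRange_zero_nat]
  simp only [List.nil_append,
    col_eval codes k 0 (by norm_num) (by norm_num) hlen,
    col_eval codes k 1 (by norm_num) (by norm_num) hlen,
    col_eval codes k 2 (by norm_num) (by norm_num) hlen,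
    col_eval codes k 3 (by norm_num) (by norm_num) hlen,
    col_eval codes k 4 (by norm_num) (by norm_num) hlen,
    col_eval codes k 5 (by norm_num) (by norm_num) hlen,
    col_eval codes k 6 (by norm_num) (by norm_num) hlen,
    List.map_map, List.zip_map', List.flatMap_map]
  refine Prod.ext ?_ (Prod.ext ?_ ?_)
  · apply List.map_congr_left
    intro j _
    simp only [Function.comp]
    rw [PySem.List.pyGetD_of_nonneg _ _ (by omega),
        show ((7*(j:Int)).toNat) = 7*j by omega]
    norm_num
  · apply List.flatMap_congr
    intro j _
    simp only [Function.comp,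
      PySem.List.pyGetD_of_nonneg _ _ (show (0:Int) ≤ 7*(j:Int)+1 by omega),
      PySem.List.pyGetD_of_nonneg _ _ (show (0:Int) ≤ 7*(j:Int)+4 by omega)]
    rw [show ((7*(j:Int)+1).toNat) = 1+7*j by omega,
        show ((7*(j:Int)+4).toNat) = 4+7*j by omega]
    norm_num [show Int.toNat 2 = 2 from rfl, show Int.toNat 3 = 3 from rfl,
      show Int.toNat 4 = 4 from rfl, show Int.toNat 5 = 5 from rfl, show Int.toNat 6 = 6 from rfl]
  · apply List.flatMap_congr
    intro j _
    simp only [Function.comp,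
      PySem.List.pyGetD_of_nonneg _ _ (show (0:Int) ≤ 7*(j:Int)+2 by omega),
      PySem.List.pyGetD_of_nonneg _ _ (show (0:Int) ≤ 7*(j:Int)+3 by omega),
      PySem.List.pyGetD_of_nonneg _ _ (show (0:Int) ≤ 7*(j:Int)+5 by omega),
      PySem.List.pyGetD_of_nonneg _ _ (show (0:Int) ≤ 7*(j:Int)+6 by omega)]
    rw [show ((7*(j:Int)+2).toNat) = 2+7*j by omega,
        show ((7*(j:Int)+3).toNat) = 3+7*j by omega,
        show ((7*(j:Int)+5).toNat) = 5+7*j by omega,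
        show ((7*(j:Int)+6).toNat) = 6+7*j by omega]
    norm_num [show Int.toNat 2 = 2 from rfl, show Int.toNat 3 = 3 from rfl,
      show Int.toNat 4 = 4 from rfl, show Int.toNat 5 = 5 from rfl, show Int.toNat 6 = 6 from rfl]
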